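-- pv_equiv track=rewrite | github.com/lokie861/RegisterX | Converstion.py | from_string
-- ===== SOURCE A (Python) =====
-- from typing import List, Union
--
-- def from_string(value: str, inverse: bool = False) -> List[int]:
--     """
--     Convert ASCII string into a list of u16 registers.
--     Each register stores 2 ASCII chars.
--
--     inverse=False → little-endian (low byte first, default)
--     inverse=True  → big-endian   (high byte first)
--     """
--     data = value.encode("ascii")
--     # pad to even length
--     if len(data) % 2 != 0:
--         data += b"\x00"
--     registers = []
--     for i in range(0, len(data), 2):
--         if not inverse:  # little-endian
--             registers.append(data[i] | (data[i+1] << 8))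
--         else:  # big-endian
--             registers.append((data[i] << 8) | data[i+1])
--     return registers
-- ===== SOURCE B (Python) =====
-- import struct
--
-- def from_string(value, inverse=False):
--     """
--     Convert ASCII string into a list of u16 registers, two chars per register.
--     Instead of assembling each register with shifts in a Python loop, pad the
--     encoded buffer to even length and decode it in one bulk struct.unpack call:
--     byte-order char '<' (little-endian) or '>' (big-endian) followed by one 'H'
--     per register.
--     """
--     data = value.encode("ascii")
--     if len(data) % 2 != 0:
--         data += b"\x00"
--     fmt = (">" if inverse else "<") + "H" * (len(data) // 2)
--     return list(struct.unpack(fmt, data))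
-- ===== Notes on version B (the rewrite author's own statement) =====
-- stated objective: idiomatic
-- what changed: Replaces the explicit range(0,len,2) loop with per-pair shift/or assembly by a single bulk struct.unpack decode of the padded buffer, driven by a byte-order-plus-repeated-u16 format string built from the length.
import Mathlib
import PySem

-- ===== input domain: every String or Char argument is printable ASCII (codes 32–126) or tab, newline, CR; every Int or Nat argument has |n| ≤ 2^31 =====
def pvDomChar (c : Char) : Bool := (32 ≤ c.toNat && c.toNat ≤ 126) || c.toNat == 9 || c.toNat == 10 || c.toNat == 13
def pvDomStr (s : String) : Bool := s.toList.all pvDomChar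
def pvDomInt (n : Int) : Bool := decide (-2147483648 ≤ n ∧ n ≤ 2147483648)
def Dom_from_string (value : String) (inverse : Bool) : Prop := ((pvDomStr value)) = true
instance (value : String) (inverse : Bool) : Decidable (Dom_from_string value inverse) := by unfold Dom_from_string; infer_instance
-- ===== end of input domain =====

-- B replaces A's per-pair bit-shift loop by one bulk struct.unpack decode of the padded
-- buffer driven by a byte-order-plus-repeated-u16 format string (idiomatic bulk decode, same cost).


-- ===== PORT A =====
-- value.encode("ascii"): each byte is the char's code point (exact on the ASCII domain;
-- non-ASCII would raise, outside Dom). `x | (y << 8)` on bytes 0 ≤ x < 256, 0 ≤ y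
-- equals x + y * 256, and `(x << 8) | y` equals x * 256 + y — exact here.
def from_string (value : String) (inverse : Bool) : List Int :=
  let data0 : List Int := value.toList.map (fun c => (c.toNat : Int))
  -- pad to even length
  let data : List Int := if data0.length % 2 ≠ 0 then data0 ++ [0] else data0
  (PySem.List.pyRange 0 (data.length : Int) 2).foldl
    (fun registers i =>
      if !inverse then  -- little-endian
        registers ++ [PySem.List.pyGetD data i 0 + PySem.List.pyGetD data (i+1) 0 * 256]
      else  -- big-endian
        registers ++ [PySem.List.pyGetD data i 0 * 256 + PySem.List.pyGetD data (i+1) 0])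
    []

-- ===== PORT B =====
-- Hand port of struct.unpack restricted to the formats Source B builds: a 'H' field (u16)
-- consumes two bytes, low-first under '<', high-first under '>' — exact for these formats.
def pvUnpackFields (big : Bool) : List Char → List Int → List Int
  | 'H' :: fs, a :: b :: rest =>
      (if big then a * 256 + b else a + b * 256) :: pvUnpackFields big fs rest
  | _, _ => []

def pvStructUnpack (fmt : List Char) (bytes : List Int) : List Int :=
  match fmt with
  | '>' :: fs => pvUnpackFields true fs bytes
  | '<' :: fs => pvUnpackFields false fs bytes
  | _ => []

def from_string_alt (value : String) (inverse : Bool) : List Int :=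
  let data0 : List Int := value.toList.map (fun c => (c.toNat : Int))
  let data : List Int := if data0.length % 2 ≠ 0 then data0 ++ [0] else data0
  let fmt : List Char :=
    (if inverse then '>' else '<') :: List.replicate (data.length / 2) 'H'
  pvStructUnpack fmt data

-- ===== PRECONDITION & SPEC =====
def Spec_from_string (value : String) (inverse : Bool) (out : List Int) : Prop := out = from_string_alt value inverse
instance (value : String) (inverse : Bool) (out : List Int) : Decidable (Spec_from_string value inverse out) := by unfold Spec_from_string; infer_instance

-- ===== CLAIM (what is proved, stated in full; the proofs are below) =====
def Claim_equal_from_string : Prop := ∀ (value : String) (inverse : Bool), Dom_from_string value inverse → Spec_from_string value inverse (from_string value inverse)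

-- ===== LEMMAS AND PROOFS =====

lemma pv_pyGetD_cons_succ (x : Int) (xs : List Int) (i : Int) (h : 0 ≤ i) (d : Int) :
    PySem.List.pyGetD (x::xs) (i+1) d = PySem.List.pyGetD xs i d := by
  obtain ⟨n, rfl⟩ := Int.eq_ofNat_of_zero_le h
  rw [show ((n:Int)+1) = ((n+1 : Nat) : Int) by push_cast; ring]
  rw [PySem.List.pyGetD_natCast, PySem.List.pyGetD_natCast]
  simp

lemma pv_pyRange_two_cons (n : Int) (h : 0 < n) :
    PySem.List.pyRange 0 n 2 = 0 :: PySem.List.pyRange 2 n 2 := by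
  rw [PySem.List.pyRange_of_pos 0 n (by norm_num), PySem.List.pyRange_of_pos 2 n (by norm_num)]
  have h1 : ((n - 0 + 2 - 1) / 2).toNat = (if (2:Int) < n then ((n - 2 + 2 - 1) / 2).toNat else 0) + 1 := by
    split_ifs with h2 <;> omega
  simp only [if_pos h, h1, List.range_succ_eq_map, List.map_cons, List.map_map]
  refine congrArg₂ List.cons (by norm_num) ?_
  apply List.map_congr_left; intro k _; push_cast [Function.comp]; ring

lemma pv_pyRange_two_shift (m : Int) :
    PySem.List.pyRange 2 (m+2) 2 = (PySem.List.pyRange 0 m 2).map (· + 2) := by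
  rw [PySem.List.pyRange_of_pos 2 (m+2) (by norm_num), PySem.List.pyRange_of_pos 0 m (by norm_num),
    List.map_map]
  have h1 : ((2:Int) < m + 2) = (0 < m) := by simp only [eq_iff_iff]; omega
  have h2 : m + 2 - 2 + 2 - 1 = m - 0 + 2 - 1 := by ring
  simp only [h1, h2]
  apply List.map_congr_left; intro k _; simp [Function.comp]; ring

-- A's foldl over range(0, len, 2) equals the bulk field-by-field unpack of the same buffer.
lemma pv_foldl_unpack (big : Bool) (g : Int → Int → Int)
    (hg : ∀ a b, g a b = if big then a * 256 + b else a + b * 256) :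
    ∀ (D acc : List Int), D.length % 2 = 0 →
      (PySem.List.pyRange 0 (D.length : Int) 2).foldl
          (fun r i => r ++ [g (PySem.List.pyGetD D i 0) (PySem.List.pyGetD D (i+1) 0)]) acc
        = acc ++ pvUnpackFields big (List.replicate (D.length / 2) 'H') D
  | [], acc, _ => by
    rw [show (([] : List Int).length : Int) = 0 by simp,
      PySem.List.pyRange_of_pos 0 0 (by norm_num)]
    simp [pvUnpackFields]
  | [_], acc, h => by simp at h
  | a :: b :: rest, acc, h => by
    have hlen : ((a :: b :: rest).length : Int) = (rest.length : Int) + 2 := by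
      simp; omega
    have heven : rest.length % 2 = 0 := by simp at h; omega
    rw [hlen, pv_pyRange_two_cons _ (by positivity), pv_pyRange_two_shift, List.foldl_cons,
      List.foldl_map]
    have hbody : ∀ (r : List Int), ∀ i ∈ PySem.List.pyRange 0 (rest.length : Int) 2,
        r ++ [g (PySem.List.pyGetD (a :: b :: rest) (i + 2) 0)
               (PySem.List.pyGetD (a :: b :: rest) (i + 2 + 1) 0)]
          = r ++ [g (PySem.List.pyGetD rest i 0) (PySem.List.pyGetD rest (i+1) 0)] := by
      intro r i hi
      have hi0 : 0 ≤ i := ((PySem.List.mem_pyRange_iff_of_pos (by norm_num) i).1 hi).1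
      rw [show i + 2 = (i + 1) + 1 by ring, show (i+1)+1+1 = ((i+1)+1)+1 by ring]
      rw [pv_pyGetD_cons_succ _ _ _ (by omega), pv_pyGetD_cons_succ _ _ _ (by omega),
        pv_pyGetD_cons_succ _ _ _ (by omega), pv_pyGetD_cons_succ _ _ _ (by omega)]
    rw [PySem.List.foldl_congr_mem _ _ _ _ hbody]
    have h0 : PySem.List.pyGetD (a :: b :: rest) 0 0 = a := by
      simp [PySem.List.pyGetD_ofNat']
    have h1 : PySem.List.pyGetD (a :: b :: rest) (0+1) 0 = b := by
      rw [pv_pyGetD_cons_succ _ _ _ (by norm_num)]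
      simp [PySem.List.pyGetD_ofNat']
    rw [h0, h1, pv_foldl_unpack big g hg rest (acc ++ [g a b]) heven]
    have hn : (a :: b :: rest).length / 2 = rest.length / 2 + 1 := by simp; omega
    rw [hn, List.replicate_succ]
    simp [pvUnpackFields, hg]

lemma pv_heven (data0 : List Int) :
    (if data0.length % 2 ≠ 0 then data0 ++ [0] else data0).length % 2 = 0 := by
  split_ifs with hp
  · simp; omega
  · omega

lemma pv_ports_agree (value : String) (inverse : Bool) :
    from_string value inverse = from_string_alt value inverse := by
  cases inverse
  · show (PySem.List.pyRange 0 _ 2).foldl _ [] = _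
    simp only [from_string_alt, Bool.false_eq_true, ite_false]
    rw [show (pvStructUnpack ('<' :: List.replicate _ 'H') _) =
        pvUnpackFields false (List.replicate _ 'H') _ from rfl]
    exact (pv_foldl_unpack false (fun x y => x + y * 256) (by intro a b; rfl) _ []
      (pv_heven _)).trans (by simp)
  · show (PySem.List.pyRange 0 _ 2).foldl _ [] = _
    simp only [from_string_alt, ite_true]
    rw [show (pvStructUnpack ('>' :: List.replicate _ 'H') _) =
        pvUnpackFields true (List.replicate _ 'H') _ from rfl]
    exact (pv_foldl_unpack true (fun x y => x * 256 + y) (by intro a b; rfl) _ []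
      (pv_heven _)).trans (by simp)

-- ===== VERDICT (by name: the statement is the Claim_ definition above) =====
theorem from_string_spec : Claim_equal_from_string := by
  intro value inverse _
  unfold Spec_from_string
  exact pv_ports_agree value inverse
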